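-- pv_equiv track=rewrite | github.com/galindosarah/Network-P2P-Project | src/peerProcess.py | getLaterPeerCount
-- ===== SOURCE A (Python) =====
-- def getLaterPeerCount(peerList, peerId):
--     count = 0
--     found = False
--
--     for peer in peerList:
--         if found:
--             count += 1
--         if peer["peerId"] == peerId:
--             found = True
--
--     return count
-- ===== SOURCE B (Python) =====
-- def getLaterPeerCount(peerList, peerId):
--     for i, peer in enumerate(peerList):
--         if peer["peerId"] == peerId:
--             return len(peerList) - i - 1
--     return 0
-- ===== Notes on version B (the rewrite author's own statement) =====
-- stated objective: simpler
-- what changed: Replaces the found-flag counter accumulation with an early-return search for the first matching index, computing the count arithmetically as len(peerList) - i - 1; Pre_ excludes exactly the inputs where A raises KeyError (some peer dict lacks the 'peerId' key).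
import Mathlib
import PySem

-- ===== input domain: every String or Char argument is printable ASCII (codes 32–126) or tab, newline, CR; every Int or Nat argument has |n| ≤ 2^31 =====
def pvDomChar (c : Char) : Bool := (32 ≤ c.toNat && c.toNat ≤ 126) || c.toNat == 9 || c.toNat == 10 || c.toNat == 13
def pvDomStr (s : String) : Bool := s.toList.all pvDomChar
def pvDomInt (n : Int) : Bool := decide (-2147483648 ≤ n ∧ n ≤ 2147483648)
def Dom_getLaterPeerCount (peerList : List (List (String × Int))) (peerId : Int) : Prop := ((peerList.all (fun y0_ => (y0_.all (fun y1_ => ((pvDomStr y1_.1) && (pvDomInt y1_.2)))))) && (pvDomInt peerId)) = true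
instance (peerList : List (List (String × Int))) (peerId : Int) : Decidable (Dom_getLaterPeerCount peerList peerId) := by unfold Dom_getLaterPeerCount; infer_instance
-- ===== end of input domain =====

-- B replaces A's found-flag counter with an early-return search for the first match plus
-- the arithmetic len - i - 1 (objective: simpler, same cost).

-- peer["peerId"]: first-match lookup in the association list (Pre_ guarantees the key exists,
-- so the default 0 is never the result of a missing key on admitted inputs)
def pvPeerId (peer : List (String × Int)) : Int := (peer.lookup "peerId").getD 0

-- ===== PORT A =====
def getLaterPeerCount (peerList : List (List (String × Int))) (peerId : Int) : Int :=
  (peerList.foldl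
    (fun (st : Int × Bool) peer =>
      let st1 := if st.2 then (st.1 + 1, st.2) else st
      if pvPeerId peer = peerId then (st1.1, true) else st1)
    (0, false)).1

-- ===== PORT B =====
-- B's loop: walk the list with the running index i, returning on the first match
def pvGoB (peerId total : Int) : List (List (String × Int)) → Int → Int
  | [], _ => 0
  | peer :: rest, i =>
    if pvPeerId peer = peerId then total - i - 1 else pvGoB peerId total rest (i + 1)

def getLaterPeerCount_alt (peerList : List (List (String × Int))) (peerId : Int) : Int :=
  pvGoB peerId (peerList.length : Int) peerList 0

-- ===== PRECONDITION & SPEC =====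
-- Pre_ excludes exactly the inputs on which Python A raises KeyError: some peer dict lacks "peerId".
def Pre_getLaterPeerCount (peerList : List (List (String × Int))) (peerId : Int) : Prop :=
  ∀ peer ∈ peerList, (peer.lookup "peerId").isSome = true
instance (peerList : List (List (String × Int))) (peerId : Int) : Decidable (Pre_getLaterPeerCount peerList peerId) := by unfold Pre_getLaterPeerCount; infer_instance
def pvWitness_getLaterPeerCount : (List (List (String × Int))) × Int := ([[("peerId", 2)], [("peerId", 5)], [("peerId", 3)]], 5)

def Spec_getLaterPeerCount (peerList : List (List (String × Int))) (peerId : Int) (out : Int) : Prop := out = getLaterPeerCount_alt peerList peerId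
instance (peerList : List (List (String × Int))) (peerId : Int) (out : Int) : Decidable (Spec_getLaterPeerCount peerList peerId out) := by unfold Spec_getLaterPeerCount; infer_instance

-- ===== CLAIM =====
def Claim_equal_getLaterPeerCount : Prop := ∀ (peerList : List (List (String × Int))) (peerId : Int), Dom_getLaterPeerCount peerList peerId → Pre_getLaterPeerCount peerList peerId → Spec_getLaterPeerCount peerList peerId (getLaterPeerCount peerList peerId)

-- ===== LEMMAS AND PROOFS =====

-- A's fold step, named so the proofs can rewrite one step at a time
def pvFA (peerId : Int) (st : Int × Bool) (peer : List (String × Int)) : Int × Bool :=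
  let st1 := if st.2 then (st.1 + 1, st.2) else st
  if pvPeerId peer = peerId then (st1.1, true) else st1

theorem pvA_eq_foldFA (peerList : List (List (String × Int))) (peerId : Int) :
    getLaterPeerCount peerList peerId = (peerList.foldl (pvFA peerId) (0, false)).1 := rfl

-- once found, A's loop adds 1 for every remaining element
theorem pvA_found (peerId : Int) (l : List (List (String × Int))) (c : Int) :
    (l.foldl (pvFA peerId) (c, true)).1 = c + l.length := by
  induction l generalizing c with
  | nil => simp
  | cons x xs ih =>
    have hstep : pvFA peerId (c, true) x = (c + 1, true) := by
      simp [pvFA]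
    rw [List.foldl_cons, hstep, ih]
    simp; omega

-- A's result is len - firstMatchIdx - 1, or 0 with no match
theorem pvA_char (peerId : Int) (l : List (List (String × Int))) :
    getLaterPeerCount l peerId =
      match l.findIdx? (fun p => pvPeerId p == peerId) with
      | none => 0
      | some k => (l.length : Int) - k - 1 := by
  induction l with
  | nil => simp [getLaterPeerCount]
  | cons x xs ih =>
    rw [pvA_eq_foldFA] at ih ⊢
    rw [List.foldl_cons, List.findIdx?_cons]
    by_cases h : pvPeerId x = peerId
    · have hstep : pvFA peerId ((0 : Int), false) x = (0, true) := by
        simp [pvFA, h]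
      rw [hstep, pvA_found peerId xs 0]
      simp [h]
    · have hstep : pvFA peerId ((0 : Int), false) x = (0, false) := by
        simp [pvFA, h]
      rw [hstep, ih]
      have hb : (pvPeerId x == peerId) = false := by simpa using h
      rw [hb]
      cases hf : xs.findIdx? (fun p => pvPeerId p == peerId) <;> simp <;> omega

-- B's search, started at offset s, is the same arithmetic on the first matching index
theorem pvB_char (peerId total : Int) (l : List (List (String × Int))) (s : Int) :
    pvGoB peerId total l s =
      match l.findIdx? (fun p => pvPeerId p == peerId) with
      | none => 0
      | some k => total - (s + k) - 1 := by
  induction l generalizing s with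
  | nil => simp [pvGoB]
  | cons x xs ih =>
    rw [List.findIdx?_cons]
    by_cases h : pvPeerId x = peerId
    · simp [pvGoB, h]
    · have hb : (pvPeerId x == peerId) = false := by simpa using h
      rw [hb]
      simp only [pvGoB, h, if_false, ih (s + 1)]
      cases hf : xs.findIdx? (fun p => pvPeerId p == peerId) <;> simp <;> omega

-- ===== VERDICT =====
theorem getLaterPeerCount_spec : Claim_equal_getLaterPeerCount := by
  intro peerList peerId _ _
  unfold Spec_getLaterPeerCount getLaterPeerCount_alt
  rw [pvB_char, pvA_char]
  cases hf : peerList.findIdx? (fun p => pvPeerId p == peerId) <;> simp
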